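-- pv_equiv track=rewrite | github.com/eyosiasbitsu/Competitive-programming-A2SV | week2/arithmetic-subarrays.py | checkArt
-- ===== SOURCE A (Python) =====
-- def checkArt(l: list[int]) -> bool:
--         l.sort()
--         st = []
--         for i in range(len(l)):
--             if len(st) <= 1:
--                 st.append(l[i])
--             elif st[-1] - st[-2] == l[i] - st[-1]:
--                 st.append(l[i])
--         if len(st) == len(l):
--             return True
--         else:
--             return False
-- ===== SOURCE B (Python) =====
-- def checkArt(l: list[int]) -> bool:
--     n = len(l)
--     if n <= 2:
--         return True
--     mn = min(l)
--     mx = max(l)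
--     q, r = divmod(mx - mn, n - 1)
--     if r != 0:
--         return False
--     s = set(l)
--     if len(s) != (1 if q == 0 else n):
--         return False
--     return all(mn + i * q in s for i in range(n))
-- ===== Notes on version B (the rewrite author's own statement) =====
-- stated objective: faster
-- what changed: replaces sort-then-scan with an O(n) check: min/max give the forced common difference d=(max-min)/(n-1), then a set of the elements certifies that the multiset is exactly {min, min+d, ..., max}
import Mathlib
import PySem

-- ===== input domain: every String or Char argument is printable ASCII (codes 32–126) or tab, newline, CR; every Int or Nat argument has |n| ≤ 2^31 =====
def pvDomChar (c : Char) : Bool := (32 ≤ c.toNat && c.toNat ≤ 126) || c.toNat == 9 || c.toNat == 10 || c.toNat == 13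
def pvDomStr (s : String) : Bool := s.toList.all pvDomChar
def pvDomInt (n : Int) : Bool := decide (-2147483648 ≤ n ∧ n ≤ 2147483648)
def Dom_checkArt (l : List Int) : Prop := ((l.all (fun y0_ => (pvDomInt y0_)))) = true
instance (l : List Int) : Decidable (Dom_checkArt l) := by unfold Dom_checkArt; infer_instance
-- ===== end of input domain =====

-- B replaces A's sort-then-scan by an O(n) min/max/set check; A sorts its argument in
-- place (B does not mutate it) — the equivalence proved here is about the return value.

-- ===== PORT A =====
-- the loop body: st is kept in REVERSE order (head = st[-1], tail head = st[-2]);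
-- same branches in the same order as the Python
def pvStepA (st : List Int) (x : Int) : List Int :=
  if st.length ≤ 1 then x :: st
  else if (st.headD 0) - (st.tail.headD 0) == x - (st.headD 0) then x :: st else st

def checkArt (l : List Int) : Bool :=
  let ls := PySem.List.sorted l (fun x => x) false
  let st := ls.foldl pvStepA ([] : List Int)
  if st.length == ls.length then true else false

-- ===== PORT B =====
def checkArt_alt (l : List Int) : Bool :=
  let n := l.length
  if n ≤ 2 then true
  else
    match PySem.List.min? l (fun x => x), PySem.List.max? l (fun x => x) with
    | some mn, some mx =>
      match PySem.Int.divmod? (mx - mn) ((n : Int) - 1) with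
      | some (q, r) =>
        if r ≠ 0 then false
        else
          let s : PySem.Set Int := PySem.Set.ofList l
          if s.length ≠ (if q = 0 then 1 else n) then false
          else (List.range n).all (fun i => PySem.Set.contains s (mn + (i : Int) * q))
      | none => false
    | _, _ => false

-- ===== PRECONDITION & SPEC =====
def Spec_checkArt (l : List Int) (out : Bool) : Prop := out = checkArt_alt l
instance (l : List Int) (out : Bool) : Decidable (Spec_checkArt l out) := by unfold Spec_checkArt; infer_instance

-- ===== CLAIM (what is proved, stated in full; the proofs are below) =====
def Claim_equal_checkArt : Prop := ∀ (l : List Int), Dom_checkArt l → Spec_checkArt l (checkArt l)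

-- ===== LEMMAS AND PROOFS =====

-- "the list is arithmetic as it stands": the pure spec both ports are reduced to
def isArith : List Int → Bool
  | a :: b :: c :: t => (b - a == c - b) && isArith (b :: c :: t)
  | _ => true

-- arithmetic progression a, a+d, …, a+(n-1)d
def APr (a d : Int) : Nat → List Int
  | 0 => []
  | n + 1 => a :: APr (a + d) d n

-- the loop guard of A, in match form
def pvCond (st : List Int) (x : Int) : Bool :=
  match st with
  | a :: b :: _ => a - b == x - a
  | _ => true

lemma pvStepA_eq (st : List Int) (x : Int) :
    pvStepA st x = if pvCond st x then x :: st else st := by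
  match st with
  | [] => simp [pvStepA, pvCond]
  | [a] => simp [pvStepA, pvCond]
  | a :: b :: t => simp [pvStepA, pvCond]

-- the chain condition A's run checks, threading the reversed prefix
def chainOK : List Int → List Int → Bool
  | _, [] => true
  | st, x :: xs => pvCond st x && chainOK (x :: st) xs

lemma foldl_pvStepA_length_le (xs st : List Int) :
    (xs.foldl pvStepA st).length ≤ st.length + xs.length := by
  induction xs generalizing st with
  | nil => simp
  | cons x xs ih =>
    simp only [List.foldl_cons, pvStepA_eq]
    split
    · have := ih (x :: st); simp only [List.length_cons] at this ⊢; omega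
    · have := ih st; simp only [List.length_cons]; omega

lemma foldl_pvStepA_length_iff (xs st : List Int) :
    (xs.foldl pvStepA st).length = st.length + xs.length ↔ chainOK st xs = true := by
  induction xs generalizing st with
  | nil => simp [chainOK]
  | cons x xs ih =>
    simp only [List.foldl_cons, pvStepA_eq, chainOK, Bool.and_eq_true]
    by_cases h : pvCond st x = true
    · rw [if_pos h]
      have := ih (x :: st)
      simp only [List.length_cons] at this
      simp only [List.length_cons]
      constructor
      · intro hl; exact ⟨h, (this.mp (by omega))⟩
      · intro ⟨_, hc⟩; have := this.mpr hc; omega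
    · rw [if_neg h]
      have hle := foldl_pvStepA_length_le xs st
      simp only [List.length_cons]
      constructor
      · intro hl; omega
      · intro ⟨hc, _⟩; exact absurd hc h

lemma chainOK_cons_cons (xs : List Int) : ∀ (a b : Int) (st : List Int),
    chainOK (a :: b :: st) xs = isArith (b :: a :: xs) := by
  induction xs with
  | nil => intro a b st; simp [chainOK, isArith]
  | cons x xs ih =>
    intro a b st
    simp only [chainOK, pvCond, isArith, ih]

lemma chainOK_nil (ls : List Int) : chainOK [] ls = isArith ls := by
  match ls with
  | [] => rfl
  | [x] => rfl
  | x :: y :: xs =>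
    show chainOK [] (x :: y :: xs) = _
    simp only [chainOK, pvCond, Bool.true_and]
    exact chainOK_cons_cons xs y x []

-- A computes isArith of the sorted list
lemma checkArt_eq_isArith (l : List Int) :
    checkArt l = isArith (PySem.List.sorted l (fun x => x) false) := by
  unfold checkArt
  set ls := PySem.List.sorted l (fun x => x) false with hls
  have h := foldl_pvStepA_length_iff ls []
  simp only [List.length_nil, Nat.zero_add] at h
  rw [chainOK_nil] at h
  by_cases hA : isArith ls = true
  · simp [h.mpr hA, hA]
  · have hne : (ls.foldl pvStepA []).length ≠ ls.length := fun hc => hA (h.mp hc)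
    simp only [Bool.not_eq_true] at hA
    simp [hne, hA]

-- facts about APr
lemma APr_length (a d : Int) (n : Nat) : (APr a d n).length = n := by
  induction n generalizing a with
  | zero => rfl
  | succ n ih => simp [APr, ih]

lemma mem_APr (x a d : Int) (n : Nat) : x ∈ APr a d n ↔ ∃ i : Nat, i < n ∧ x = a + i * d := by
  induction n generalizing a with
  | zero => simp [APr]
  | succ n ih =>
    simp only [APr, List.mem_cons, ih]
    constructor
    · rintro (rfl | ⟨i, hi, rfl⟩)
      · exact ⟨0, by omega, by ring⟩
      · exact ⟨i + 1, by omega, by push_cast; ring⟩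
    · rintro ⟨i, hi, rfl⟩
      match i with
      | 0 => left; simp
      | i + 1 => right; exact ⟨i, by omega, by push_cast; ring⟩

lemma isArith_APr (a d : Int) (n : Nat) : isArith (APr a d n) = true := by
  induction n using Nat.strong_induction_on generalizing a with
  | _ n ih =>
    match n with
    | 0 => rfl
    | 1 => rfl
    | 2 => simp [APr, isArith]
    | n + 3 =>
      show isArith (a :: (a + d) :: (a + d + d) :: APr (a + d + d + d) d n) = true
      have h2 := ih (n + 2) (by omega) (a + d)
      simp only [isArith, Bool.and_eq_true, beq_iff_eq]
      exact ⟨by ring, h2⟩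

lemma isArith_eq_APr {t : List Int} : ∀ (a b : Int), isArith (a :: b :: t) = true →
    a :: b :: t = APr a (b - a) (t.length + 2) := by
  induction t with
  | nil => intro a b _; simp [APr]
  | cons c t ih =>
    intro a b h
    simp only [isArith, Bool.and_eq_true, beq_iff_eq] at h
    obtain ⟨hd, hrest⟩ := h
    have hb : a + (b - a) = b := by ring
    show a :: b :: c :: t = a :: APr (a + (b - a)) (b - a) (t.length + 2)
    rw [hb, hd, ih b c hrest]

lemma pairwise_lt_APr (a d : Int) (n : Nat) (hd : 0 < d) :
    (APr a d n).Pairwise (· < ·) := by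
  induction n generalizing a with
  | zero => simp [APr]
  | succ n ih =>
    simp only [APr, List.pairwise_cons]
    refine ⟨?_, ih (a + d)⟩
    intro x hx
    obtain ⟨i, hi, rfl⟩ := (mem_APr x (a + d) d n).mp hx
    nlinarith [Int.natCast_nonneg i]

lemma isArith_short {s : List Int} (h : s.length ≤ 2) : isArith s = true := by
  match s with
  | [] => rfl
  | [_] => rfl
  | [_, _] => rfl
  | _ :: _ :: _ :: _ => simp at h

lemma APr_zero (a : Int) (n : Nat) : APr a 0 n = List.replicate n a := by
  induction n with
  | zero => rfl
  | succ n ih => simp [APr, List.replicate_succ, ih]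

-- a nonempty Nodup list all of whose members equal a is [a]
lemma all_eq_singleton {t : List Int} {a : Int} (hnd : t.Nodup) (hmem : a ∈ t)
    (hall : ∀ y ∈ t, y = a) : t = [a] := by
  match t with
  | [] => simp at hmem
  | x :: u =>
    have hx : x = a := hall x (by simp)
    have hu : u = [] := by
      rw [List.eq_nil_iff_forall_not_mem]
      intro y hy
      have : y = a := hall y (by simp [hy])
      subst this hx
      exact (List.nodup_cons.mp hnd).1 hy
    rw [hx, hu]

-- set(l) has full length iff l has no duplicates
lemma ofList_length_eq_iff_nodup (l : List Int) :
    (PySem.Set.ofList l).length = l.length ↔ l.Nodup := by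
  constructor
  · intro h
    induction l with
    | nil => simp
    | cons x xs ih =>
      rw [PySem.Set.ofList_cons] at h
      have hfil : (PySem.Set.ofList xs).discard x = (PySem.Set.ofList xs).filter (fun y => !(y == x)) := rfl
      have h1 : ((PySem.Set.ofList xs).filter (fun y => !(y == x))).length ≤ (PySem.Set.ofList xs).length :=
        List.length_filter_le _ _
      have h2 := PySem.Set.length_ofList_le xs
      simp only [List.length_cons, hfil] at h
      have hlenx : (PySem.Set.ofList xs).length = xs.length := by omega
      have hfull : ((PySem.Set.ofList xs).filter (fun y => !(y == x))).length = (PySem.Set.ofList xs).length := by omega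
      have hallp := List.length_filter_eq_length_iff.mp hfull
      have hxnot : x ∉ xs := by
        intro hxm
        have := hallp x ((PySem.Set.mem_ofList xs x).mpr hxm)
        simp at this
      exact List.nodup_cons.mpr ⟨hxnot, ih hlenx⟩
  · intro h; rw [PySem.Set.ofList_eq_self_of_nodup l h]

-- the heart of the equivalence: for n ≥ 3 the sorted list is arithmetic iff
-- the common difference forced by min/max divides evenly, the element set has the
-- right size, and every progression member is present
lemma central (l : List Int) (h3 : 3 ≤ l.length) (mn mx : Int)
    (hmn : PySem.List.min? l (fun x => x) = some mn)
    (hmx : PySem.List.max? l (fun x => x) = some mx) :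
    (isArith (PySem.List.sorted l (fun x => x) false) = true) ↔
    (PySem.Int.mod (mx - mn) ((l.length : Int) - 1) = 0 ∧
     (PySem.Set.ofList l).length =
       (if PySem.Int.floordiv (mx - mn) ((l.length : Int) - 1) = 0 then 1 else l.length) ∧
     ∀ i : Nat, i < l.length →
       (mn + (i : Int) * PySem.Int.floordiv (mx - mn) ((l.length : Int) - 1)) ∈ PySem.Set.ofList l) := by
  set n := l.length with hn
  set q := PySem.Int.floordiv (mx - mn) ((n : Int) - 1) with hq
  set r := PySem.Int.mod (mx - mn) ((n : Int) - 1) with hr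
  set s := PySem.List.sorted l (fun x => x) false with hs
  have hp : s.Perm l := PySem.List.sorted_perm l (fun x => x) false
  have hslen : s.length = n := PySem.List.length_sorted l (fun x => x) false
  have hmnle : ∀ y ∈ l, mn ≤ y := fun y hy => PySem.List.min?_isMin hmn y hy
  have hmxge : ∀ y ∈ l, y ≤ mx := fun y hy => PySem.List.max?_isMax hmx y hy
  have hmnl : mn ∈ l := PySem.List.min?_mem hmn
  have hmxl : mx ∈ l := PySem.List.max?_mem hmx
  have hb : (0 : Int) < (n : Int) - 1 := by omega
  have hdm := PySem.Int.floordiv_mul_add_mod (mx - mn) ((n : Int) - 1)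
  rw [← hq, ← hr] at hdm
  constructor
  · intro hA
    obtain ⟨s0, s1, t, hsc⟩ : ∃ a b t, s = a :: b :: t := by
      match s, hslen with
      | a :: b :: t, _ => exact ⟨a, b, t, rfl⟩
      | [], h => simp at h; exact (by omega : False).elim
      | [a], h => simp at h; exact (by omega : False).elim
    set d := s1 - s0 with hd
    rw [hsc] at hA
    have hAP := isArith_eq_APr s0 s1 hA
    have htl : t.length + 2 = n := by
      have := hslen; rw [hsc] at this; simpa using this
    rw [htl] at hAP
    have hmem_s : ∀ x, x ∈ s ↔ ∃ i : Nat, i < n ∧ x = s0 + (i : Int) * d := by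
      intro x; rw [hsc, hAP]; exact mem_APr x s0 d n
    have hd0 : 0 ≤ d := by
      have hpw := PySem.List.sorted_pairwise l (fun x => x)
      rw [← hs, hsc, List.pairwise_cons] at hpw
      have := hpw.1 s1 (by simp)
      simp at this; omega
    -- mn is the head
    have hmn_eq : mn = s0 := by
      have h1 : mn ≤ s0 := hmnle s0 (hp.mem_iff.mp ((hmem_s s0).mpr ⟨0, by omega, by simp⟩))
      obtain ⟨i, _, hieq⟩ := (hmem_s mn).mp (hp.mem_iff.mpr hmnl)
      have : (0:Int) ≤ (i : Int) * d := mul_nonneg (by positivity) hd0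
      omega
    -- mx is the last element
    have hmx_eq : mx = s0 + ((n : Int) - 1) * d := by
      have hlastmem : s0 + ((n : Int) - 1) * d ∈ s := by
        rw [hmem_s]
        refine ⟨n - 1, by omega, ?_⟩
        congr 1
        have : ((n - 1 : Nat) : Int) = (n : Int) - 1 := by omega
        rw [this]
      have h1 : s0 + ((n : Int) - 1) * d ≤ mx := hmxge _ (hp.mem_iff.mp hlastmem)
      obtain ⟨i, hi, hieq⟩ := (hmem_s mx).mp (hp.mem_iff.mpr hmxl)
      have hile : (i : Int) ≤ (n : Int) - 1 := by omega
      have : (i : Int) * d ≤ ((n : Int) - 1) * d := mul_le_mul_of_nonneg_right hile hd0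
      omega
    have hdiff : mx - mn = ((n : Int) - 1) * d := by omega
    have hr0 : r = 0 := by
      rw [hr]
      exact (PySem.Int.mod_eq_zero_iff_dvd _ _).mpr ⟨d, hdiff⟩
    have hqd : q = d := by
      rw [hr0] at hdm
      have : q * ((n : Int) - 1) = d * ((n : Int) - 1) := by linarith [hdm, hdiff]
      exact mul_right_cancel₀ (by omega) this
    refine ⟨hr0, ?_, ?_⟩
    · by_cases hdz : d = 0
      · rw [if_pos (by rw [hqd, hdz])]
        have hall : ∀ y ∈ PySem.Set.ofList l, y = mn := by
          intro y hy
          obtain ⟨i, _, hieq⟩ := (hmem_s y).mp (hp.mem_iff.mpr ((PySem.Set.mem_ofList l y).mp hy))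
          rw [hieq, hdz, hmn_eq]; ring
        rw [all_eq_singleton (PySem.Set.nodup_ofList l) ((PySem.Set.mem_ofList l mn).mpr hmnl) hall]
        rfl
      · rw [if_neg (by rw [hqd]; exact hdz)]
        have hdpos : 0 < d := by omega
        have hsnd : s.Nodup := by
          rw [hsc, hAP]
          exact (pairwise_lt_APr s0 d n hdpos).imp ne_of_lt
        have : l.Nodup := hp.nodup_iff.mp hsnd
        exact (ofList_length_eq_iff_nodup l).mpr this
    · intro i hi
      rw [PySem.Set.mem_ofList]
      apply hp.mem_iff.mp
      rw [hmem_s]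
      exact ⟨i, hi, by rw [hqd, hmn_eq]⟩
  · rintro ⟨hr0, hlen, hmem⟩
    by_cases hqz : q = 0
    · have hmxmn : mx = mn := by
        rw [hr0, hqz] at hdm; omega
      have hall : ∀ y ∈ s, y = mn := by
        intro y hy
        have hyl := hp.mem_iff.mp hy
        have := hmnle y hyl; have := hmxge y hyl
        omega
      have : s = List.replicate s.length mn := List.eq_replicate_of_mem hall
      rw [this, hslen, ← APr_zero]
      exact isArith_APr mn 0 n
    · have hmnmx : mn ≤ mx := hmxge mn hmnl
      have hqpos : 0 < q := by
        rcases lt_trichotomy q 0 with h | h | h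
        · exfalso
          have hcontra : q * ((n : Int) - 1) ≤ -((n : Int) - 1) := by nlinarith
          linarith
        · exact absurd h hqz
        · exact h
      rw [if_neg hqz] at hlen
      have hPnd : (APr mn q n).Nodup := (pairwise_lt_APr mn q n hqpos).imp ne_of_lt
      have hPsub : ∀ x ∈ APr mn q n, x ∈ PySem.Set.ofList l := by
        intro x hx
        obtain ⟨i, hi, rfl⟩ := (mem_APr x mn q n).mp hx
        exact hmem i hi
      have hPlen : (APr mn q n).length = n := APr_length mn q n
      have hperm1 : (APr mn q n).Perm (PySem.Set.ofList l) :=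
        List.Subperm.perm_of_length_le (List.Nodup.subperm hPnd hPsub) (by omega)
      have hperm2 : (PySem.Set.ofList l).Perm l :=
        List.Subperm.perm_of_length_le
          (List.Nodup.subperm (PySem.Set.nodup_ofList l) (fun x hx => (PySem.Set.mem_ofList l x).mp hx))
          (by omega)
      have hsorted : PySem.List.sorted l (fun x => x) = APr mn q n :=
        PySem.List.sorted_eq_of_perm_of_pairwise_lt l (APr mn q n) (fun x => x)
          (hperm1.trans hperm2) (pairwise_lt_APr mn q n hqpos)
      rw [← hs] at hsorted
      rw [hsorted]
      exact isArith_APr mn q n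

-- B computes isArith of the sorted list too
lemma checkArt_alt_eq_isArith (l : List Int) :
    checkArt_alt l = isArith (PySem.List.sorted l (fun x => x) false) := by
  unfold checkArt_alt
  by_cases h2 : l.length ≤ 2
  · rw [if_pos h2]
    exact (isArith_short (by rw [PySem.List.length_sorted]; exact h2)).symm
  · rw [if_neg h2]
    have h3 : 3 ≤ l.length := by omega
    have hne : l ≠ [] := by intro h; rw [h] at h3; simp at h3
    obtain ⟨mn, hmn⟩ : ∃ m, PySem.List.min? l (fun x => x) = some m := by
      cases hm : PySem.List.min? l (fun x => x) with
      | none => rw [PySem.List.min?_eq_none_iff] at hm; exact absurd hm hne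
      | some m => exact ⟨m, rfl⟩
    obtain ⟨mx, hmx⟩ : ∃ m, PySem.List.max? l (fun x => x) = some m := by
      cases hm : PySem.List.max? l (fun x => x) with
      | none => rw [PySem.List.max?_eq_none_iff] at hm; exact absurd hm hne
      | some m => exact ⟨m, rfl⟩
    have hbne : ((l.length : Int) - 1) ≠ 0 := by omega
    have hdm : PySem.Int.divmod? (mx - mn) ((l.length : Int) - 1) =
        some (PySem.Int.floordiv (mx - mn) ((l.length : Int) - 1),
              PySem.Int.mod (mx - mn) ((l.length : Int) - 1)) := by
      simp [PySem.Int.divmod?, PySem.Int.floordiv, PySem.Int.mod, hbne]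
    simp only [hmn, hmx, hdm]
    have hiff := central l h3 mn mx hmn hmx
    rw [Bool.eq_iff_iff]
    constructor
    · intro hL
      by_cases hrne : PySem.Int.mod (mx - mn) ((l.length : Int) - 1) ≠ 0
      · rw [if_pos hrne] at hL; exact absurd hL Bool.false_ne_true
      · rw [if_neg hrne] at hL
        by_cases hlen : (PySem.Set.ofList l).length ≠
            (if PySem.Int.floordiv (mx - mn) ((l.length : Int) - 1) = 0 then 1 else l.length)
        · rw [if_pos hlen] at hL; exact absurd hL Bool.false_ne_true
        · rw [if_neg hlen] at hL
          apply hiff.mpr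
          refine ⟨not_ne_iff.mp hrne, not_ne_iff.mp hlen, ?_⟩
          intro i hi
          rw [List.all_eq_true] at hL
          have := hL i (List.mem_range.mpr hi)
          rwa [PySem.Set.contains_iff] at this
    · intro hA
      obtain ⟨hr0, hlen, hmem⟩ := hiff.mp hA
      rw [if_neg (not_ne_iff.mpr hr0), if_neg (not_ne_iff.mpr hlen)]
      rw [List.all_eq_true]
      intro i hi
      rw [PySem.Set.contains_iff]
      exact hmem i (List.mem_range.mp hi)

-- ===== VERDICT (by name: the statement is the Claim_ definition above) =====
theorem checkArt_spec : Claim_equal_checkArt := by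
  intro l _
  show checkArt l = checkArt_alt l
  rw [checkArt_eq_isArith, checkArt_alt_eq_isArith]
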